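-- pv_equiv track=rewrite | github.com/lmgibson/text2ThingsToDo | code/utilities.py | findStartOfNotes
-- ===== SOURCE A (Python) =====
-- def findStartOfNotes(textList):
--     notesStart = None
--     for idx, i in enumerate(textList):
--         if i.lower().replace(" ", "").startswith('tothings'):
--             notesStart = idx
--         else:
--             pass
--     return notesStart
-- ===== SOURCE B (Python) =====
-- def findStartOfNotes(textList):
--     for idx in range(len(textList) - 1, -1, -1):
--         if textList[idx].lower().replace(" ", "").startswith('tothings'):
--             return idx
--     return None
-- ===== Notes on version B (the rewrite author's own statement) =====
-- stated objective: idiomatic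
-- what changed: B scans the indices in reverse and returns on the first match (early exit), instead of A's full forward pass that keeps overwriting a running variable.
import Mathlib
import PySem

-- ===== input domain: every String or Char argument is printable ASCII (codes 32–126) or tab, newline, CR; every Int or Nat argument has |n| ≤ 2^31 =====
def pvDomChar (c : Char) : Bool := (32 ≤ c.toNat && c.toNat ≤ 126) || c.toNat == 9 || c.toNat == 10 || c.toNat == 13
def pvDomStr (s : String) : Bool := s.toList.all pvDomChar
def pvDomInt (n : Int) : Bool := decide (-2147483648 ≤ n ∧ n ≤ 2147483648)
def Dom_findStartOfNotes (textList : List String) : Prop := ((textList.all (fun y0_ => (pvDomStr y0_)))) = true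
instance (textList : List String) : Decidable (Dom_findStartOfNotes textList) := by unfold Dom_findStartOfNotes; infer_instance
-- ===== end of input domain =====

-- B replaces A's full forward scan (overwriting a running variable) by a reverse index scan
-- with early exit; same return value, more idiomatic.


-- shared test: i.lower().replace(" ", "").startswith('tothings')  (identical expression in both Pythons)
def pvIsNotes (s : String) : Bool :=
  PySem.Str.startswith (PySem.Str.replace (PySem.Str.lower s) " " "") "tothings"

-- ===== PORT A =====
def findStartOfNotes (textList : List String) : Option Int :=
  (PySem.List.enumerate textList).foldl
    (fun notesStart p => if pvIsNotes p.2 then some p.1 else notesStart) none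

-- ===== PORT B =====
-- countdown loop: for idx in range(len(textList)-1, -1, -1): …  (idx = n-1 at step 'n')
def pvRevScan (textList : List String) : Nat → Option Int
  | 0 => none
  | n + 1 =>
    match PySem.List.pyGet? textList (n : Int) with
    | some s => if pvIsNotes s then some (n : Int) else pvRevScan textList n
    | none => none   -- unreachable: idx is always in range
def findStartOfNotes_alt (textList : List String) : Option Int :=
  pvRevScan textList textList.length

-- ===== PRECONDITION & SPEC =====
def Spec_findStartOfNotes (textList : List String) (out : Option Int) : Prop := out = findStartOfNotes_alt textList
instance (textList : List String) (out : Option Int) : Decidable (Spec_findStartOfNotes textList out) := by unfold Spec_findStartOfNotes; infer_instance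

-- ===== CLAIM (what is proved, stated in full; the proofs are below) =====
def Claim_equal_findStartOfNotes : Prop := ∀ (textList : List String), Dom_findStartOfNotes textList → Spec_findStartOfNotes textList (findStartOfNotes textList)

-- ===== LEMMAS AND PROOFS =====

theorem pvEnumerate_append (l m : List String) (s : Int) :
    PySem.List.enumerate (l ++ m) s
      = PySem.List.enumerate l s ++ PySem.List.enumerate m (s + l.length) := by
  induction l generalizing s with
  | nil => simp [PySem.List.enumerate_nil]
  | cons x xs ih =>
      simp [PySem.List.enumerate_cons, ih]
      ring_nf

theorem pvRevScan_append (l : List String) (x : String) (n : Nat) (hn : n ≤ l.length) :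
    pvRevScan (l ++ [x]) n = pvRevScan l n := by
  induction n with
  | zero => rfl
  | succ k ih =>
      have hk : k < l.length := by omega
      simp only [pvRevScan, PySem.List.pyGet?_natCast,
        List.getElem?_append_left hk, ih (by omega)]

theorem pvMain (l : List String) : findStartOfNotes l = findStartOfNotes_alt l := by
  induction l using List.reverseRecOn with
  | nil => rfl
  | append_singleton l x ih =>
      unfold findStartOfNotes findStartOfNotes_alt
      rw [pvEnumerate_append, List.foldl_append]
      have hlen : (l ++ [x]).length = l.length + 1 := by simp
      rw [hlen]
      simp only [PySem.List.enumerate_cons, PySem.List.enumerate_nil, List.foldl_cons,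
        List.foldl_nil, pvRevScan, PySem.List.pyGet?_natCast]
      have hget : (l ++ [x])[l.length]? = some x := by
        simp
      rw [hget, pvRevScan_append l x l.length le_rfl]
      unfold findStartOfNotes findStartOfNotes_alt at ih
      rw [ih]
      simp

-- ===== VERDICT (by name: the statement is the Claim_ definition above) =====
theorem findStartOfNotes_spec : Claim_equal_findStartOfNotes := by
  intro l _
  unfold Spec_findStartOfNotes
  exact pvMain l
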